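-- pv_equiv track=rewrite | github.com/manuelguerreroia/crearcuentagithub | 1_div_enteros.py | clasificar_numeros
-- ===== SOURCE A (Python) =====
-- def clasificar_numeros(lista):
--     listaPos = []
--     listaNeg = []
--
--     for e in lista:
--         if e < 0:
--             listaNeg.append(e)
--         else:
--             listaPos.append(e)
--
--         listaPos.sort()
--         listaNeg.sort()
--
--     return listaPos, listaNeg
-- ===== SOURCE B (Python) =====
-- def clasificar_numeros(lista):
--     s = sorted(lista)
--     lo, hi = 0, len(s)
--     while lo < hi:
--         mid = (lo + hi) // 2
--         if s[mid] < 0: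
--             lo = mid + 1
--         else:
--             hi = mid
--     return s[lo:], s[:lo]
-- ===== Notes on version B (the rewrite author's own statement) =====
-- stated objective: faster
-- what changed: B sorts the whole list once globally, then binary-searches the sorted list for the negative/non-negative boundary and returns the two slices, instead of A's two growing lists re-sorted after every append.
import Mathlib
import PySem

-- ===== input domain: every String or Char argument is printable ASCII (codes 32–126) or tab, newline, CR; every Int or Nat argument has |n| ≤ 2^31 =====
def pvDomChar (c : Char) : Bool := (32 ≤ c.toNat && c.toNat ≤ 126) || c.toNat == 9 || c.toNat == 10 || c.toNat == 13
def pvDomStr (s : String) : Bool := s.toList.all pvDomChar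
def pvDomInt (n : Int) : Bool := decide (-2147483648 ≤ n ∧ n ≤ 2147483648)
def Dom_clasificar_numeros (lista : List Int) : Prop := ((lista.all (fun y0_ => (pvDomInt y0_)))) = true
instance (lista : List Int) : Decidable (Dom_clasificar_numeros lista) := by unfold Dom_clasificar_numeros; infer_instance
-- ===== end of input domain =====

-- B sorts the whole list once, binary-searches the negative/non-negative boundary and slices (faster).
-- ===== PORT A =====
def pvStepA (st : List Int × List Int) (e : Int) : List Int × List Int :=
  let st' := if e < 0 then (st.1, st.2 ++ [e]) else (st.1 ++ [e], st.2)
  (PySem.List.sorted st'.1 (fun x => x) false, PySem.List.sorted st'.2 (fun x => x) false)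

def clasificar_numeros (lista : List Int) : List Int × List Int :=
  lista.foldl pvStepA ([], [])

-- ===== PORT B =====
-- the while loop: lo, hi evolve; returns the final lo.
-- fuel only makes the recursion structural: hi - lo shrinks each step, so
-- fuel = len(s) (the outer call) always suffices and the 0-fuel arm is never reached there.
def pvBisect (s : List Int) : Nat → Int → Int → Int
  | 0, lo, _ => lo
  | fuel + 1, lo, hi =>
    if lo < hi then
      let mid := PySem.Int.floordiv (lo + hi) 2
      match PySem.List.pyGet? s mid with
      | some v => if v < 0 then pvBisect s fuel (mid + 1) hi else pvBisect s fuel lo mid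
      | none => lo   -- unreachable in B: the loop keeps 0 ≤ lo ≤ mid < hi ≤ len(s)
    else lo

def clasificar_numeros_alt (lista : List Int) : List Int × List Int :=
  let s := PySem.List.sorted lista (fun x => x) false
  let lo := pvBisect s s.length 0 (s.length : Int)
  (PySem.List.slice s (some lo) none, PySem.List.slice s none (some lo))

-- ===== PRECONDITION & SPEC =====
def Spec_clasificar_numeros (lista : List Int) (out : List Int × List Int) : Prop := out = clasificar_numeros_alt lista
instance (lista : List Int) (out : List Int × List Int) : Decidable (Spec_clasificar_numeros lista out) := by unfold Spec_clasificar_numeros; infer_instance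

-- ===== CLAIM (what is proved, stated in full; the proofs are below) =====
def Claim_equal_clasificar_numeros : Prop := ∀ (lista : List Int), Dom_clasificar_numeros lista → Spec_clasificar_numeros lista (clasificar_numeros lista)

-- ===== LEMMAS AND PROOFS =====
-- sorting a list then appending, then sorting again = sorting the appended list once
lemma pv_sorted_append (xs : List Int) (e : Int) :
    PySem.List.sorted (PySem.List.sorted xs (fun x => x) false ++ [e]) (fun x => x) false
      = PySem.List.sorted (xs ++ [e]) (fun x => x) false := by
  apply PySem.List.sorted_eq_sorted_of_perm _ _ _ (fun a b h => h)
  exact (PySem.List.sorted_perm xs (fun x => x) false).append_right [e]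

-- A's loop: starting from sorted accumulators it yields the sorted partitioned result
lemma pv_loopA (l p n : List Int) :
    l.foldl pvStepA (PySem.List.sorted p (fun x => x) false, PySem.List.sorted n (fun x => x) false)
      = (PySem.List.sorted (p ++ l.filter (fun e => decide (e ≥ 0))) (fun x => x) false,
         PySem.List.sorted (n ++ l.filter (fun e => decide (e < 0))) (fun x => x) false) := by
  induction l generalizing p n with
  | nil => simp
  | cons e l ih =>
    by_cases he : e < 0
    · have : pvStepA (PySem.List.sorted p (fun x => x) false, PySem.List.sorted n (fun x => x) false) e
          = (PySem.List.sorted p (fun x => x) false, PySem.List.sorted (n ++ [e]) (fun x => x) false) := by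
        simp [pvStepA, he, PySem.List.sorted_sorted, pv_sorted_append]
      simp only [List.foldl_cons, this, ih p (n ++ [e])]
      have h1 : ¬ e ≥ 0 := by omega
      simp [he, h1]
    · have : pvStepA (PySem.List.sorted p (fun x => x) false, PySem.List.sorted n (fun x => x) false) e
          = (PySem.List.sorted (p ++ [e]) (fun x => x) false, PySem.List.sorted n (fun x => x) false) := by
        simp [pvStepA, he, PySem.List.sorted_sorted, pv_sorted_append]
      simp only [List.foldl_cons, this, ih (p ++ [e]) n]
      have h1 : e ≥ 0 := by omega
      simp [he, h1]

-- in a ≤-sorted list the negatives are exactly the first (countP (· < 0)) elements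
lemma pv_prefix (s : List Int) (hs : s.Pairwise (· ≤ ·)) :
    s.filter (fun x => decide (x < 0)) = s.take (s.countP (fun x => decide (x < 0)))
    ∧ s.filter (fun x => decide (x ≥ 0)) = s.drop (s.countP (fun x => decide (x < 0))) := by
  induction s with
  | nil => simp
  | cons a t ih =>
    have ht := ih (List.Pairwise.of_cons hs)
    by_cases ha : a < 0
    · simp only [List.filter_cons, List.countP_cons, ha, decide_true, if_pos]
      constructor
      · simp [ht.1]
      · have : ¬ a ≥ 0 := by omega
        simp [this, ht.2]
    · have hall : ∀ x ∈ t, a ≤ x := (List.pairwise_cons.mp hs).1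
      have hc0 : t.countP (fun x => decide (x < 0)) = 0 := by
        rw [List.countP_eq_zero]
        intro x hx
        have := hall x hx
        simp; omega
      have hf0 : t.filter (fun x => decide (x < 0)) = [] := by
        rw [List.filter_eq_nil_iff]
        intro x hx
        have := hall x hx
        simp; omega
      have hfs : t.filter (fun x => decide (x ≥ 0)) = t := by
        rw [List.filter_eq_self]
        intro x hx
        have := hall x hx
        simp; omega
      have ha' : a ≥ 0 := by omega
      simp [ha, ha', hc0, hf0, hfs]

-- binary search on a list whose negatives are exactly the indices < k returns k
lemma pv_bisect_eq (s : List Int) (k : Nat)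
    (hneg : ∀ (i : Nat) (h : i < s.length), i < k → s[i] < 0)
    (hpos : ∀ (i : Nat) (h : i < s.length), k ≤ i → ¬ s[i] < 0) :
    ∀ (n : Nat) (lo hi : Int), (hi - lo).toNat ≤ n → 0 ≤ lo → hi ≤ (s.length : Int) →
      lo ≤ (k : Int) → (k : Int) ≤ hi → pvBisect s n lo hi = (k : Int) := by
  intro n
  induction n with
  | zero =>
    intro lo hi hfuel h0 hlen hlk hkh
    simp only [pvBisect]
    omega
  | succ n ih =>
    intro lo hi hfuel h0 hlen hlk hkh
    by_cases hlt : lo < hi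
    · simp only [pvBisect, hlt, if_true]
      have hm : PySem.Int.floordiv (lo + hi) 2 = (lo + hi) / 2 :=
        PySem.Int.floordiv_eq_ediv_of_pos (by omega)
      set mid := PySem.Int.floordiv (lo + hi) 2 with hmid
      have hb1 : lo ≤ mid := by omega
      have hb2 : mid < hi := by omega
      have hml : mid.toNat < s.length := by omega
      have hget : PySem.List.pyGet? s mid = some s[mid.toNat] :=
        PySem.List.pyGet?_eq_some_getElem s (by omega) (by omega)
      rw [hget]
      by_cases hv : s[mid.toNat] < 0
      · have hmk : mid < (k : Int) := by
          by_contra hc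
          exact hpos mid.toNat hml (by omega) hv
        simp only [hv, if_true]
        exact ih (mid + 1) hi (by omega) (by omega) hlen (by omega) hkh
      · have hmk : (k : Int) ≤ mid := by
          by_contra hc
          exact hv (hneg mid.toNat hml (by omega))
        simp only [hv, if_false]
        exact ih lo mid (by omega) h0 (by omega) hlk hmk
    · simp only [pvBisect, hlt, if_false]
      omega

-- sorting a filtered list = filtering the sorted list
lemma pv_sorted_filter (lista : List Int) (p : Int → Bool) :
    PySem.List.sorted (lista.filter p) (fun x => x) false
      = (PySem.List.sorted lista (fun x => x) false).filter p := by
  apply PySem.List.sorted_id_eq_of_perm_of_pairwise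
  · exact (PySem.List.sorted_perm lista (fun x => x) false).filter p
  · exact ((PySem.List.sorted_pairwise lista (fun x => x)).sublist List.filter_sublist)

-- ===== VERDICT (by name: the statement is the Claim_ definition above) =====
theorem clasificar_numeros_spec : Claim_equal_clasificar_numeros := by
  intro lista _
  show clasificar_numeros lista = clasificar_numeros_alt lista
  set s := PySem.List.sorted lista (fun x => x) false with hsdef
  have hs : s.Pairwise (· ≤ ·) := PySem.List.sorted_pairwise lista (fun x => x)
  set k := s.countP (fun x => decide (x < 0)) with hkdef
  have hpref := pv_prefix s hs
  have hk_le : k ≤ s.length := List.countP_le_length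
  have hneg : ∀ (i : Nat) (h : i < s.length), i < k → s[i] < 0 := by
    intro i h hik
    have htk : (s.take k)[i]'(by simp [List.length_take]; omega) = s[i] := List.getElem_take
    have hmem : s[i] ∈ s.take k := htk ▸ List.getElem_mem _
    rw [← hpref.1] at hmem
    simpa using (List.of_mem_filter hmem)
  have hpos : ∀ (i : Nat) (h : i < s.length), k ≤ i → ¬ s[i] < 0 := by
    intro i h hik
    have hdl : i - k < (s.drop k).length := by simp [List.length_drop]; omega
    have htd : (s.drop k)[i - k]'hdl = s[i] := by
      rw [List.getElem_drop]
      congr 1; omega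
    have hmem : s[i] ∈ s.drop k := htd ▸ List.getElem_mem _
    rw [← hpref.2] at hmem
    have := List.of_mem_filter hmem
    simp at this; omega
  have hb : pvBisect s s.length 0 (s.length : Int) = (k : Int) :=
    pv_bisect_eq s k hneg hpos s.length 0 (s.length : Int) (by omega) (by omega) le_rfl
      (by exact_mod_cast Nat.zero_le k) (by exact_mod_cast hk_le)
  have hA := pv_loopA lista [] []
  simp only [List.nil_append] at hA
  have hA' : clasificar_numeros lista
      = (PySem.List.sorted (lista.filter (fun e => decide (e ≥ 0))) (fun x => x) false,
         PySem.List.sorted (lista.filter (fun e => decide (e < 0))) (fun x => x) false) := by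
    simpa [clasificar_numeros, PySem.List.sorted] using hA
  rw [hA', clasificar_numeros_alt]
  simp only [← hsdef, hb]
  rw [PySem.List.slice_from_natCast, PySem.List.slice_to_natCast]
  rw [pv_sorted_filter lista (fun e => decide (e ≥ 0)), pv_sorted_filter lista (fun e => decide (e < 0))]
  rw [← hsdef, hpref.1, hpref.2, ← hkdef]
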